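-- pv_equiv track=rewrite | github.com/Gonzasestopal/persuasion_bot | tests/test_openai_adapter.py | _find_system_and_user
-- ===== SOURCE A (Python) =====
-- def _find_system_and_user(msgs):
--     """
--     Find first system and last user message (typical pattern: system first, user second).
--     Be tolerant if order changes slightly.
--     """
--     sys_msg = next((m for m in msgs if m.get("role") == "system"), None)
--     usr_msg = None
--     for m in reversed(msgs):
--         if m.get("role") == "user":
--             usr_msg = m
--             break
--     assert sys_msg is not None, "No system message found"
--     assert usr_msg is not None, "No user message found"
--     return sys_msg, usr_msg
-- ===== SOURCE B (Python) =====
-- def _find_system_and_user(msgs):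
--     """Single forward pass: keep the first system message and the last user message."""
--     sys_msg = None
--     usr_msg = None
--     for m in msgs:
--         role = m.get("role")
--         if role == "system" and sys_msg is None:
--             sys_msg = m
--         if role == "user":
--             usr_msg = m
--     assert sys_msg is not None, "No system message found"
--     assert usr_msg is not None, "No user message found"
--     return sys_msg, usr_msg
-- ===== Notes on version B (the rewrite author's own statement) =====
-- stated objective: simpler
-- what changed: Replaces the generator-next() scan plus a second reversed() scan with one forward loop that tracks the first system message and the last-seen user message.
import Mathlib
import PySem

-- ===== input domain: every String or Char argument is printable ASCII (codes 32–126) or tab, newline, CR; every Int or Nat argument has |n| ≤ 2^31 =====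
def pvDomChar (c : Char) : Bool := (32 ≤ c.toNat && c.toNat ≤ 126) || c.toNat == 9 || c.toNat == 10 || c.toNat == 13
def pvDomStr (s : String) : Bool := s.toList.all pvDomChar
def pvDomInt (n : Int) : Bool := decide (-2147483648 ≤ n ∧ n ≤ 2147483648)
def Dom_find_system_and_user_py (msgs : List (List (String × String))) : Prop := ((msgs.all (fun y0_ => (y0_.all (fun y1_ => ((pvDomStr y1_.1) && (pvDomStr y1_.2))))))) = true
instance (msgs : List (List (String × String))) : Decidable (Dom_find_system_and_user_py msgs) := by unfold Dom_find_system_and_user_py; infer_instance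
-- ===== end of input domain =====

-- B replaces A's next()-generator scan plus reversed() scan with one forward loop
-- tracking first-system and last-seen-user (objective: simpler, same value on Pre_).


-- m.get("role") == r : first-match association-list lookup compared to the role literal
def pvRoleIs (m : List (String × String)) (r : String) : Bool :=
  ((m.find? (fun p => p.1 == "role")).map (·.2)) == some r

-- ===== PORT A =====
def find_system_and_user_py (msgs : List (List (String × String))) : (List (String × String)) × (List (String × String)) :=
  -- sys_msg = next((m for m in msgs if m.get("role") == "system"), None)
  let sys_msg : Option (List (String × String)) := msgs.find? (fun m => pvRoleIs m "system")
  -- for m in reversed(msgs): if m.get("role") == "user": usr_msg = m; break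
  let usr_msg : Option (List (String × String)) := msgs.reverse.find? (fun m => pvRoleIs m "user")
  -- the asserts raise exactly when one is none; Pre_ excludes that, so getD is unreachable filler
  (sys_msg.getD [], usr_msg.getD [])

-- ===== PORT B =====
def find_system_and_user_py_alt (msgs : List (List (String × String))) : (List (String × String)) × (List (String × String)) :=
  let st := msgs.foldl
    (fun (st : Option (List (String × String)) × Option (List (String × String))) m =>
      (if st.1.isNone && pvRoleIs m "system" then some m else st.1,
       if pvRoleIs m "user" then some m else st.2))
    (none, none)
  (st.1.getD [], st.2.getD [])

-- ===== PRECONDITION & SPEC =====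
-- Pre_ excludes inputs lacking a system message or a user message, on which the Python raises AssertionError.
def Pre_find_system_and_user_py (msgs : List (List (String × String))) : Prop :=
  (msgs.any (fun m => pvRoleIs m "system")) = true ∧ (msgs.any (fun m => pvRoleIs m "user")) = true
instance (msgs : List (List (String × String))) : Decidable (Pre_find_system_and_user_py msgs) := by unfold Pre_find_system_and_user_py; infer_instance

def pvWitness_find_system_and_user_py : (List (List (String × String))) :=
  [[("role", "system"), ("content", "be nice")], [("role", "user"), ("content", "hi")]]

def Spec_find_system_and_user_py (msgs : List (List (String × String))) (out : (List (String × String)) × (List (String × String))) : Prop := out = find_system_and_user_py_alt msgs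
instance (msgs : List (List (String × String))) (out : (List (String × String)) × (List (String × String))) : Decidable (Spec_find_system_and_user_py msgs out) := by unfold Spec_find_system_and_user_py; infer_instance

-- ===== CLAIM (what is proved, stated in full; the proofs are below) =====
def Claim_equal_find_system_and_user_py : Prop := ∀ (msgs : List (List (String × String))), Dom_find_system_and_user_py msgs → Pre_find_system_and_user_py msgs → Spec_find_system_and_user_py msgs (find_system_and_user_py msgs)

-- ===== LEMMAS AND PROOFS =====

-- once set, B's first-system accumulator never changes
theorem foldl_first_some {α : Type} (p : α → Bool) (x : α) :
    ∀ (l : List α),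
      l.foldl (fun s m => if s.isNone && p m then some m else s) (some x) = some x := by
  intro l; induction l with
  | nil => rfl
  | cons a t ih => simpa using ih

-- B's first-system accumulator: keeping the first hit equals List.find?
theorem foldl_first_eq_find? {α : Type} (p : α → Bool) :
    ∀ (l : List α) (init : Option α),
      l.foldl (fun s m => if s.isNone && p m then some m else s) init
        = (init.orElse (fun _ => l.find? p)) := by
  intro l
  induction l with
  | nil => intro init; cases init <;> simp
  | cons a t ih =>
    intro init
    cases init with
    | some x =>
      rw [List.foldl_cons, if_neg (by simp), foldl_first_some]
      simp [Option.orElse]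
    | none =>
      rw [List.foldl_cons]
      by_cases h : p a = true
      · rw [if_pos (by simp [h]), foldl_first_some, List.find?_cons_of_pos h]
        simp [Option.orElse]
      · rw [if_neg (by simp [h]), ih, List.find?_cons_of_neg h]

-- B's last-user accumulator: overwriting equals List.find? on the reverse
theorem foldl_last_eq_find?_reverse {α : Type} (p : α → Bool) :
    ∀ (l : List α) (init : Option α),
      l.foldl (fun s m => if p m then some m else s) init
        = ((l.reverse.find? p).orElse (fun _ => init)) := by
  intro l
  induction l with
  | nil => intro init; simp
  | cons a t ih =>
    intro init
    simp only [List.foldl_cons, ih, List.reverse_cons, List.find?_append]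
    by_cases h : p a = true <;> cases ht : t.reverse.find? p <;>
      simp [h, Option.orElse]


-- ===== VERDICT (by name: the statement is the Claim_ definition above) =====
theorem find_system_and_user_py_spec : Claim_equal_find_system_and_user_py := by
  intro msgs _ _
  show _ = _
  unfold find_system_and_user_py find_system_and_user_py_alt
  rw [PySem.List.foldl_prod_mk
        (f := fun s m => if s.isNone && pvRoleIs m "system" then some m else s)
        (g := fun s m => if pvRoleIs m "user" then some m else s)]
  rw [foldl_first_eq_find?, foldl_last_eq_find?_reverse]
  cases msgs.reverse.find? (fun m => pvRoleIs m "user") <;> simp [Option.orElse]
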